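-- pv_equiv track=rewrite | github.com/tushargoel97/ai-streaming-platform | backend/app/services/intro_detection.py | _find_common_run
-- ===== SOURCE A (Python) =====
-- def _find_common_run(
--     all_windows: list[list[str]],
-- ) -> tuple[int, int]:
--     """Find the longest run of windows that appears in ALL episode fingerprints.
--
--     Returns (start_window, end_window) indices (end exclusive).
--     Returns (0, 0) if no common run found.
--     """
--     if not all_windows or len(all_windows) < 2:
--         return (0, 0)
--
--     # Build a set of windows for each episode for O(1) lookup
--     sets = [set(w) for w in all_windows]
--     ref = all_windows[0]
--     n = len(ref)
--
--     best_start = 0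
--     best_len = 0
--     i = 0
--     while i < n:
--         # Check if ref[i] appears in all other episodes
--         if all(ref[i] in s for s in sets[1:]):
--             j = i
--             while j < n and all(ref[j] in s for s in sets[1:]):
--                 j += 1
--             run_len = j - i
--             if run_len > best_len:
--                 best_len = run_len
--                 best_start = i
--             i = j
--         else:
--             i += 1
--
--     return (best_start, best_start + best_len)
-- ===== SOURCE B (Python) =====
-- def _find_common_run(
--     all_windows: list[list[str]],
-- ) -> tuple[int, int]:
--     """Find the longest run of windows that appears in ALL episode fingerprints.
--
--     Returns (start_window, end_window) indices (end exclusive).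
--     Returns (0, 0) if no common run found.
--     """
--     if not all_windows or len(all_windows) < 2:
--         return (0, 0)
--
--     others = [set(w) for w in all_windows[1:]]
--     ref = all_windows[0]
--     # mask[i]: does ref[i] appear in every other episode?
--     mask = [all(x in s for s in others) for x in ref]
--
--     best_start = best_len = 0
--     cur_start = cur_len = 0
--     for i, m in enumerate(mask):
--         if m:
--             if cur_len == 0:
--                 cur_start = i
--             cur_len += 1
--             if cur_len > best_len:
--                 best_len = cur_len
--                 best_start = cur_start
--         else:
--             cur_len = 0
--
--     return (best_start, best_start + best_len)
-- ===== Notes on version B (the rewrite author's own statement) =====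
-- stated objective: simpler
-- what changed: Replaces A's nested while-loop with an inner run-scanning jump by a precomputed per-position membership mask followed by one flat pass that maintains a running current-run length and records the best (strictly longer) run.
import Mathlib
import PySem

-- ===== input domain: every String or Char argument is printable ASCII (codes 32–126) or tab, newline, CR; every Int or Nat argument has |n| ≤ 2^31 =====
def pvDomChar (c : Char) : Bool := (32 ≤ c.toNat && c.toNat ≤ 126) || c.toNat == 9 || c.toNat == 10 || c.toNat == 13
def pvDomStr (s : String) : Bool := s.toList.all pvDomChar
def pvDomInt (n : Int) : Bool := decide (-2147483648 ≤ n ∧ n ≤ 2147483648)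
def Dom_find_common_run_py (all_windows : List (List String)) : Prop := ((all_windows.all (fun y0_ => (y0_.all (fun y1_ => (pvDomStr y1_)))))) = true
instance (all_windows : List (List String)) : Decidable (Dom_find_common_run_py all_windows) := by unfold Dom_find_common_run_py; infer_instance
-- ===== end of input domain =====

-- B replaces A's nested while-loop-with-jump by a precomputed membership mask plus one flat
-- running-current-run scan (simpler decomposition; same asymptotic cost).

-- ===== PORT A =====
-- inner  `while j < n and all(ref[j] in s for s in sets[1:]): j += 1`  (m j = the all(...) test)
def innerA (m : Int → Bool) (n j : Int) : Int :=
  if h : j < n ∧ m j = true then innerA m n (j + 1) else j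
termination_by (n - j).toNat
decreasing_by omega

theorem innerA_ge (m : Int → Bool) (n j : Int) : j ≤ innerA m n j := by
  by_cases h : j < n ∧ m j = true
  · rw [innerA, dif_pos h]
    have := innerA_ge m n (j + 1)
    omega
  · rw [innerA, dif_neg h]
termination_by (n - j).toNat
decreasing_by omega

theorem innerA_lt (m : Int → Bool) (n j : Int) (h1 : j < n) (h2 : m j = true) :
    j < innerA m n j := by
  rw [innerA, dif_pos ⟨h1, h2⟩]
  have := innerA_ge m n (j + 1)
  omega

-- outer `while i < n: …` of A, carrying (best_start, best_len)
def loopA (m : Int → Bool) (n i best_start best_len : Int) : Int × Int :=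
  if h : i < n then
    if hm : m i = true then
      let j := innerA m n i
      let run := j - i
      if run > best_len then loopA m n j i run
      else loopA m n j best_start best_len
    else loopA m n (i + 1) best_start best_len
  else (best_start, best_len)
termination_by (n - i).toNat
decreasing_by
  · have := innerA_lt m n i h hm; omega
  · have := innerA_lt m n i h hm; omega
  · omega

-- all(ref[i] in s for s in sets[1:])
def memAllA (sets : List (PySem.Set String)) (x : String) : Bool :=
  (PySem.List.slice sets (some 1) none).all (fun s => PySem.Set.contains s x)

def find_common_run_py (all_windows : List (List String)) : Int × Int :=
  if all_windows = [] ∨ all_windows.length < 2 then (0, 0)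
  else
    let sets := all_windows.map (fun w => PySem.Set.ofList w)
    let ref := PySem.List.pyGetD all_windows 0 []   -- all_windows[0]; in range: list nonempty here
    let n : Int := ref.length
    -- ref[i] in the loop: 0 ≤ i < n always, so pyGetD is exact
    let r := loopA (fun i => memAllA sets (PySem.List.pyGetD ref i "")) n 0 0 0
    (r.1, r.1 + r.2)

-- ===== PORT B =====
-- body of `for i, m in enumerate(mask)`; state = (best_start, best_len, cur_start, cur_len)
def stepB (st : Int × Int × Int × Int) (p : Int × Bool) : Int × Int × Int × Int :=
  let (bs, bl, cs, cl) := st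
  let (i, mflag) := p
  if mflag then
    let cs' := if cl = 0 then i else cs
    let cl' := cl + 1
    if cl' > bl then (cs', cl', cs', cl') else (bs, bl, cs', cl')
  else (bs, bl, cs, 0)

def find_common_run_py_alt (all_windows : List (List String)) : Int × Int :=
  if all_windows = [] ∨ all_windows.length < 2 then (0, 0)
  else
    let others := (PySem.List.slice all_windows (some 1) none).map (fun w => PySem.Set.ofList w)
    let ref := PySem.List.pyGetD all_windows 0 []   -- all_windows[0]; in range: list nonempty here
    let mask := ref.map (fun x => others.all (fun s => PySem.Set.contains s x))
    let st := (PySem.List.enumerate mask 0).foldl stepB (0, 0, 0, 0)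
    (st.1, st.1 + st.2.1)

-- ===== PRECONDITION & SPEC =====
def Spec_find_common_run_py (all_windows : List (List String)) (out : Int × Int) : Prop := out = find_common_run_py_alt all_windows
instance (all_windows : List (List String)) (out : Int × Int) : Decidable (Spec_find_common_run_py all_windows out) := by unfold Spec_find_common_run_py; infer_instance

-- ===== CLAIM (what is proved, stated in full; the proofs are below) =====
def Claim_equal_find_common_run_py : Prop := ∀ (all_windows : List (List String)), Dom_find_common_run_py all_windows → Spec_find_common_run_py all_windows (find_common_run_py all_windows)

-- ===== LEMMAS AND PROOFS =====
theorem innerA_le (m : Int → Bool) (n j : Int) (h : j ≤ n) : innerA m n j ≤ n := by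
  by_cases hc : j < n ∧ m j = true
  · rw [innerA, dif_pos hc]
    exact innerA_le m n (j + 1) (by omega)
  · rw [innerA, dif_neg hc]; exact h
termination_by (n - j).toNat
decreasing_by omega

theorem innerA_mem (m : Int → Bool) (n j k : Int) (h1 : j ≤ k) (h2 : k < innerA m n j) :
    m k = true := by
  by_cases hc : j < n ∧ m j = true
  · rcases eq_or_lt_of_le h1 with rfl | hlt
    · exact hc.2
    · rw [innerA, dif_pos hc] at h2
      exact innerA_mem m n (j + 1) k (by omega) h2
  · rw [innerA, dif_neg hc] at h2; omega
termination_by (n - j).toNat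
decreasing_by omega

theorem innerA_stop (m : Int → Bool) (n j : Int) :
    n ≤ innerA m n j ∨ m (innerA m n j) = false := by
  by_cases hc : j < n ∧ m j = true
  · rw [innerA, dif_pos hc]
    exact innerA_stop m n (j + 1)
  · rw [innerA, dif_neg hc]
    cases hmj : m j with
    | false => exact Or.inr rfl
    | true => exact Or.inl (by by_contra hn; exact hc ⟨by omega, hmj⟩)
termination_by (n - j).toNat
decreasing_by omega

-- step equations for loopA
theorem loopA_stop (m : Int → Bool) (n i bs bl : Int) (h : ¬ i < n) :
    loopA m n i bs bl = (bs, bl) := by rw [loopA, dif_neg h]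

theorem loopA_false (m : Int → Bool) (n i bs bl : Int) (h : i < n) (hm : m i = false) :
    loopA m n i bs bl = loopA m n (i + 1) bs bl := by
  rw [loopA, dif_pos h, dif_neg (by simp [hm])]

theorem loopA_true (m : Int → Bool) (n i bs bl : Int) (h : i < n) (hm : m i = true) :
    loopA m n i bs bl =
      if innerA m n i - i > bl then loopA m n (innerA m n i) i (innerA m n i - i)
      else loopA m n (innerA m n i) bs bl := by
  rw [loopA, dif_pos h, dif_pos hm]

-- abstract index form of B's fold (proof-only)
def scanB (m : Int → Bool) (n i bs bl cs cl : Int) : Int × Int × Int × Int :=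
  if h : i < n then
    if hm : m i = true then
      let cs' := if cl = 0 then i else cs
      let cl' := cl + 1
      if cl' > bl then scanB m n (i + 1) cs' cl' cs' cl'
      else scanB m n (i + 1) bs bl cs' cl'
    else scanB m n (i + 1) bs bl cs 0
  else (bs, bl, cs, cl)
termination_by (n - i).toNat
decreasing_by all_goals omega

-- step equations for scanB
theorem scanB_stop (m : Int → Bool) (n i bs bl cs cl : Int) (h : ¬ i < n) :
    scanB m n i bs bl cs cl = (bs, bl, cs, cl) := by rw [scanB, dif_neg h]

theorem scanB_false (m : Int → Bool) (n i bs bl cs cl : Int) (h : i < n) (hm : m i = false) :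
    scanB m n i bs bl cs cl = scanB m n (i + 1) bs bl cs 0 := by
  rw [scanB, dif_pos h, dif_neg (by simp [hm])]

theorem scanB_true (m : Int → Bool) (n i bs bl cs cl : Int) (h : i < n) (hm : m i = true) :
    scanB m n i bs bl cs cl =
      if cl + 1 > bl then
        scanB m n (i + 1) (if cl = 0 then i else cs) (cl + 1) (if cl = 0 then i else cs) (cl + 1)
      else scanB m n (i + 1) bs bl (if cl = 0 then i else cs) (cl + 1) := by
  rw [scanB, dif_pos h, dif_pos hm]

-- cur_start is irrelevant (to the returned best pair) while cur_len = 0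
theorem scanB_cs (m : Int → Bool) (n i bs bl cs cs' : Int) :
    ((scanB m n i bs bl cs 0).1, (scanB m n i bs bl cs 0).2.1)
      = ((scanB m n i bs bl cs' 0).1, (scanB m n i bs bl cs' 0).2.1) := by
  by_cases h : i < n
  · by_cases hm : m i = true
    · rw [scanB_true m n i bs bl cs 0 h hm, scanB_true m n i bs bl cs' 0 h hm]
      simp
    · rw [scanB_false m n i bs bl cs 0 h (by simpa using hm),
          scanB_false m n i bs bl cs' 0 h (by simpa using hm)]
      exact scanB_cs m n (i + 1) bs bl cs cs'
  · rw [scanB_stop m n i bs bl cs 0 h, scanB_stop m n i bs bl cs' 0 h]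
termination_by (n - i).toNat
decreasing_by omega

-- folding B across t mask-true positions inside a run (cur_len ≥ 1, cur_start = s fixed)
theorem scanB_run (m : Int → Bool) (n : Int) (t : Nat) (j bs bl c s : Int)
    (hmem : ∀ k : Int, j ≤ k → k < j + t → m k = true)
    (hc1 : 1 ≤ c) (hcb : c ≤ bl) (hn : j + t ≤ n) :
    scanB m n j bs bl s c
      = scanB m n (j + t) (if c + t > bl then s else bs) (max bl (c + t)) s (c + t) := by
  induction t generalizing j bs bl c with
  | zero =>
    have h1 : (if c + ((0:Nat):Int) > bl then s else bs) = bs := by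
      simp only [Nat.cast_zero, add_zero]; omega
    have h2 : max bl (c + ((0:Nat):Int)) = bl := by
      simp only [Nat.cast_zero, add_zero]; omega
    rw [h1, h2]
    norm_num
  | succ t' ih =>
    have hjn : j < n := by push_cast at hn ⊢; omega
    have hmj : m j = true := hmem j le_rfl (by push_cast; omega)
    rw [scanB_true m n j bs bl s c hjn hmj, if_neg (show ¬ (c = 0) by omega)]
    by_cases hb : c + 1 > bl
    · rw [if_pos hb]
      rw [ih (j + 1) s (c + 1) (c + 1)
        (fun k hk1 hk2 => hmem k (by omega) (by push_cast at hk2 ⊢; omega))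
        (by omega) le_rfl (by push_cast at hn ⊢; omega)]
      have e1 : (j : Int) + 1 + (t' : Int) = j + ((t' : Nat) + 1 : Nat) := by push_cast; ring
      have e2 : (if c + 1 + (t' : Int) > c + 1 then s else s) = (if c + (((t' : Nat) + 1 : Nat) : Int) > bl then s else bs) := by
        push_cast; split_ifs <;> first | rfl | omega
      have e3 : max (c + 1) (c + 1 + (t' : Int)) = max bl (c + (((t' : Nat) + 1 : Nat) : Int)) := by
        push_cast; omega
      have e4 : c + 1 + (t' : Int) = c + (((t' : Nat) + 1 : Nat) : Int) := by push_cast; ring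
      rw [e1, e2, e3, e4]
    · rw [if_neg hb]
      rw [ih (j + 1) bs bl (c + 1)
        (fun k hk1 hk2 => hmem k (by omega) (by push_cast at hk2 ⊢; omega))
        (by omega) (by omega) (by push_cast at hn ⊢; omega)]
      have e1 : (j : Int) + 1 + (t' : Int) = j + ((t' : Nat) + 1 : Nat) := by push_cast; ring
      have e2 : (if c + 1 + (t' : Int) > bl then s else bs) = (if c + (((t' : Nat) + 1 : Nat) : Int) > bl then s else bs) := by
        push_cast; split_ifs <;> first | rfl | omega
      have e3 : max bl (c + 1 + (t' : Int)) = max bl (c + (((t' : Nat) + 1 : Nat) : Int)) := by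
        push_cast; omega
      have e4 : c + 1 + (t' : Int) = c + (((t' : Nat) + 1 : Nat) : Int) := by push_cast; ring
      rw [e1, e2, e3, e4]

-- a whole maximal run entered with cur_len = 0
theorem scanB_run0 (m : Int → Bool) (n : Int) (t : Nat) (j bs bl cs : Int)
    (ht : 1 ≤ t)
    (hmem : ∀ k : Int, j ≤ k → k < j + t → m k = true)
    (hbl : 0 ≤ bl) (hn : j + t ≤ n) :
    scanB m n j bs bl cs 0
      = scanB m n (j + t) (if (t : Int) > bl then j else bs) (max bl t) j t := by
  obtain ⟨t', rfl⟩ : ∃ t', t = t' + 1 := ⟨t - 1, by omega⟩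
  have hjn : j < n := by push_cast at hn ⊢; omega
  have hmj : m j = true := hmem j le_rfl (by push_cast; omega)
  rw [scanB_true m n j bs bl cs 0 hjn hmj, if_pos rfl]
  by_cases hb : (0:Int) + 1 > bl
  · rw [if_pos hb]
    rw [scanB_run m n t' (j + 1) j (0 + 1) (0 + 1) j
      (fun k hk1 hk2 => hmem k (by omega) (by push_cast at hk2 ⊢; omega))
      (by omega) (by omega) (by push_cast at hn ⊢; omega)]
    have e1 : (j : Int) + 1 + (t' : Int) = j + ((t' : Nat) + 1 : Nat) := by push_cast; ring
    have e2 : (if (0:Int) + 1 + (t' : Int) > 0 + 1 then j else j) = (if ((((t' : Nat) + 1 : Nat)) : Int) > bl then j else bs) := by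
      push_cast; split_ifs <;> first | rfl | omega
    have e3 : max ((0:Int) + 1) (0 + 1 + (t' : Int)) = max bl ((((t' : Nat) + 1 : Nat)) : Int) := by
      push_cast; omega
    have e4 : (0:Int) + 1 + (t' : Int) = ((((t' : Nat) + 1 : Nat)) : Int) := by push_cast; ring
    rw [e1, e2, e3, e4]
  · rw [if_neg hb]
    rw [scanB_run m n t' (j + 1) bs bl (0 + 1) j
      (fun k hk1 hk2 => hmem k (by omega) (by push_cast at hk2 ⊢; omega))
      (by omega) (by omega) (by push_cast at hn ⊢; omega)]
    have e1 : (j : Int) + 1 + (t' : Int) = j + ((t' : Nat) + 1 : Nat) := by push_cast; ring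
    have e2 : (if (0:Int) + 1 + (t' : Int) > bl then j else bs) = (if ((((t' : Nat) + 1 : Nat)) : Int) > bl then j else bs) := by
      push_cast; split_ifs <;> first | rfl | omega
    have e3 : max bl ((0:Int) + 1 + (t' : Int)) = max bl ((((t' : Nat) + 1 : Nat)) : Int) := by
      push_cast; omega
    have e4 : (0:Int) + 1 + (t' : Int) = ((((t' : Nat) + 1 : Nat)) : Int) := by push_cast; ring
    rw [e1, e2, e3, e4]

-- the main bridge: A's jump loop equals (the best pair of) B's flat scan
theorem loopA_eq_scanB (m : Int → Bool) (n i bs bl cs : Int) (hbl : 0 ≤ bl) :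
    loopA m n i bs bl = ((scanB m n i bs bl cs 0).1, (scanB m n i bs bl cs 0).2.1) := by
  by_cases h : i < n
  · by_cases hm : m i = true
    · rw [loopA_true m n i bs bl h hm]
      set j := innerA m n i with hj
      have hij : i < j := innerA_lt m n i h hm
      have hjn : j ≤ n := innerA_le m n i (le_of_lt h)
      set t : Nat := (j - i).toNat with hts
      have htv : (t : Int) = j - i := by omega
      have ht1 : 1 ≤ t := by omega
      have hmem : ∀ k : Int, i ≤ k → k < i + t → m k = true := by
        intro k hk1 hk2
        exact innerA_mem m n i k hk1 (by omega)
      have hB := scanB_run0 m n t i bs bl cs ht1 hmem hbl (by omega)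
      rw [show i + (t : Int) = j from by omega] at hB
      rw [hB]
      rcases innerA_stop m n i with hstop | hstop
      · -- j = n : both sides terminal
        have hjn' : j = n := by rw [← hj] at hstop; omega
        rw [scanB_stop m n j _ _ i t (by omega)]
        by_cases hgt : j - i > bl
        · rw [if_pos hgt, loopA_stop m n j i (j - i) (by omega),
              if_pos (show (t:Int) > bl by omega), show max bl (t : Int) = j - i from by omega]
        · rw [if_neg hgt, loopA_stop m n j bs bl (by omega),
              if_neg (show ¬ ((t:Int) > bl) by omega), show max bl (t : Int) = bl from by omega]
      · rw [← hj] at hstop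
        by_cases hjn2 : j < n
        · -- m j = false: B resets cur_len; cur_start becomes irrelevant
          by_cases hgt : j - i > bl
          · rw [if_pos hgt, if_pos (show (t:Int) > bl by omega),
                show max bl (t : Int) = j - i from by omega,
                show (t : Int) = j - i from htv,
                scanB_false m n j i (j - i) i (j - i) hjn2 hstop,
                loopA_eq_scanB m n j i (j - i) i (by omega),
                scanB_false m n j i (j - i) i 0 hjn2 hstop]
          · rw [if_neg hgt, if_neg (show ¬ ((t:Int) > bl) by omega),
                show max bl (t : Int) = bl from by omega,
                scanB_false m n j bs bl i (t:Int) hjn2 hstop,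
                loopA_eq_scanB m n j bs bl cs hbl,
                scanB_false m n j bs bl cs 0 hjn2 hstop]
            exact scanB_cs m n (j + 1) bs bl cs i
        · -- j = n again
          have hjn' : j = n := by omega
          rw [scanB_stop m n j _ _ i t (by omega)]
          by_cases hgt : j - i > bl
          · rw [if_pos hgt, loopA_stop m n j i (j - i) (by omega),
                if_pos (show (t:Int) > bl by omega), show max bl (t : Int) = j - i from by omega]
          · rw [if_neg hgt, loopA_stop m n j bs bl (by omega),
                if_neg (show ¬ ((t:Int) > bl) by omega), show max bl (t : Int) = bl from by omega]
    · rw [loopA_false m n i bs bl h (by simpa using hm),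
          scanB_false m n i bs bl cs 0 h (by simpa using hm)]
      exact loopA_eq_scanB m n (i + 1) bs bl cs hbl
  · rw [loopA_stop m n i bs bl h, scanB_stop m n i bs bl cs 0 h]
termination_by (n - i).toNat
decreasing_by
  · have := innerA_lt m n i h hm; omega
  · have := innerA_lt m n i h hm; omega
  · omega

-- B's foldl over enumerate equals the abstract scan
theorem foldl_stepB_eq_scanB (m : Int → Bool) (l : List Bool) (off bs bl cs cl : Int)
    (hagree : ∀ k : Nat, (hk : k < l.length) → m (off + k) = l.getD k false) :
    (PySem.List.enumerate l off).foldl stepB (bs, bl, cs, cl)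
      = scanB m (off + l.length) off bs bl cs cl := by
  induction l generalizing off bs bl cs cl with
  | nil =>
    rw [PySem.List.enumerate_nil]
    rw [scanB_stop m _ off bs bl cs cl (by simp)]
    simp
  | cons b l' ih =>
    rw [PySem.List.enumerate_cons]
    simp only [List.foldl_cons]
    have hmb : m off = b := by
      have := hagree 0 (by simp)
      simpa using this
    have hlt : off < off + ((b :: l').length : Int) := by simp
    have harg : off + (((b :: l').length : Nat) : Int) = (off + 1) + ((l'.length : Nat) : Int) := by
      push_cast [List.length_cons]; ring
    have hagree' : ∀ k : Nat, (hk : k < l'.length) → m (off + 1 + k) = l'.getD k false := by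
      intro k hk
      have := hagree (k + 1) (by simp only [List.length_cons]; omega)
      simpa [List.getD_cons_succ, add_assoc, add_comm, add_left_comm] using this
    cases b with
    | false =>
      rw [scanB_false m _ off bs bl cs cl hlt hmb]
      rw [harg, ← ih (off + 1) bs bl cs 0 hagree']
      simp [stepB]
    | true =>
      rw [scanB_true m _ off bs bl cs cl hlt hmb]
      rw [harg]
      by_cases hcl : cl = 0
      · by_cases hgt : cl + 1 > bl
        · rw [if_pos hgt, ← ih (off + 1) (if cl = 0 then off else cs) (cl+1) (if cl = 0 then off else cs) (cl+1) hagree']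
          simp [stepB, hcl, show bl < (1:Int) from by omega]
        · rw [if_neg hgt, ← ih (off + 1) bs bl (if cl = 0 then off else cs) (cl+1) hagree']
          simp [stepB, hcl, show ¬ bl < (1:Int) from by omega]
      · by_cases hgt : cl + 1 > bl
        · rw [if_pos hgt, ← ih (off + 1) (if cl = 0 then off else cs) (cl+1) (if cl = 0 then off else cs) (cl+1) hagree']
          simp [stepB, hcl, hgt]
        · rw [if_neg hgt, ← ih (off + 1) bs bl (if cl = 0 then off else cs) (cl+1) hagree']
          simp [stepB, hcl, hgt]

-- ===== VERDICT (by name: the statement is the Claim_ definition above) =====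
theorem find_common_run_py_spec : Claim_equal_find_common_run_py := by
  unfold Claim_equal_find_common_run_py Spec_find_common_run_py
  intro aw _
  by_cases hg : aw = [] ∨ aw.length < 2
  · simp only [find_common_run_py, find_common_run_py_alt, if_pos hg]
  · simp only [find_common_run_py, find_common_run_py_alt, if_neg hg]
    set sets := aw.map (fun w => PySem.Set.ofList w) with hsets
    set others := (PySem.List.slice aw (some 1) none).map (fun w => PySem.Set.ofList w) with hothers
    set ref := PySem.List.pyGetD aw 0 [] with href
    set mask := ref.map (fun x => others.all (fun s => PySem.Set.contains s x)) with hmask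
    set mA : Int → Bool := fun i => memAllA sets (PySem.List.pyGetD ref i "") with hmA
    have hlen : mask.length = ref.length := by rw [hmask]; simp
    have hsl : PySem.List.slice sets (some 1) none = others := by
      rw [hsets, hothers, PySem.List.slice_from_one, PySem.List.slice_from_one]
      exact (List.map_tail).symm
    have hagree : ∀ k : Nat, (hk : k < mask.length) → mA ((0:Int) + k) = mask.getD k false := by
      intro k hk
      have hkr : k < ref.length := by omega
      have h1 : PySem.List.pyGetD ref ((0:Int) + k) "" = ref[k] := by
        rw [show (0:Int) + k = ((k : Nat) : Int) from by ring,
            PySem.List.pyGetD_natCast]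
        exact List.getD_eq_getElem ref "" hkr
      rw [hmA]
      simp only [memAllA, h1, hsl]
      rw [hmask]
      simp [hkr]
    have hfold := foldl_stepB_eq_scanB mA mask 0 0 0 0 0 hagree
    have hloop := loopA_eq_scanB mA ((ref.length : Nat) : Int) 0 0 0 0 (le_refl 0)
    rw [show (0:Int) + ((mask.length : Nat) : Int) = ((ref.length : Nat) : Int) from by simp [hlen]] at hfold
    rw [hfold, hloop]
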